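-- pv_equiv track=rewrite | github.com/pgrvs/projet-optimisation | GLPKSolver.py | _generate_lp_file
-- ===== SOURCE A (Python) =====
-- from typing import Dict, List, TypedDict
--
-- def _generate_lp_file(sensors: Dict[str, Dict[str, object]],
--                      configurations: List[List[str]]) -> str:
--     """Generates CPLEX LP format string for the problem."""
--     lines = ["Maximize"]
--
--     # Objective function
--     obj_terms = [f"t{i}" for i in range(len(configurations))]
--     lines.append("    " + " + ".join(obj_terms))
--
--     # Constraints
--     lines.append("Subject To")
--     for sensor_id, sensor_data in sensors.items():
--         terms = []
--         for i, config in enumerate(configurations):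
--             if sensor_id in config:
--                 terms.append(f"t{i}")
--         if terms:
--             lines.append(f"    {' + '.join(terms)} <= {sensor_data['life']}")
--
--     # Variable bounds
--     lines.append("Bounds")
--     for i in range(len(configurations)):
--         lines.append(f"    t{i} >= 0")
--
--     lines.append("End")
--     return "\n".join(lines)
-- ===== SOURCE B (Python) =====
-- def _generate_lp_file(sensors, configurations):
--     """Generates CPLEX LP format string for the problem."""
--     # Inverted index: one pass over configurations -> sensor id -> list of config indices
--     idx = {}
--     for i, config in enumerate(configurations):
--         for s in set(config):
--             idx.setdefault(s, []).append(i)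
--     n = len(configurations)
--     parts = ["Maximize",
--              "    " + " + ".join("t%d" % i for i in range(n)),
--              "Subject To"]
--     parts += ["    " + " + ".join("t%d" % i for i in idx.get(sid, [])) +
--               " <= %s" % data["life"]
--               for sid, data in sensors.items() if idx.get(sid, [])]
--     parts += ["Bounds"] + ["    t%d >= 0" % i for i in range(n)] + ["End"]
--     return "\n".join(parts)
-- ===== Notes on version B (the rewrite author's own statement) =====
-- stated objective: faster
-- what changed: Instead of scanning every configuration again for each sensor, B makes one pass over the configurations building an inverted index sensor-id -> list of configuration indices, then emits each sensor's constraint by a single dictionary lookup.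
import Mathlib
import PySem

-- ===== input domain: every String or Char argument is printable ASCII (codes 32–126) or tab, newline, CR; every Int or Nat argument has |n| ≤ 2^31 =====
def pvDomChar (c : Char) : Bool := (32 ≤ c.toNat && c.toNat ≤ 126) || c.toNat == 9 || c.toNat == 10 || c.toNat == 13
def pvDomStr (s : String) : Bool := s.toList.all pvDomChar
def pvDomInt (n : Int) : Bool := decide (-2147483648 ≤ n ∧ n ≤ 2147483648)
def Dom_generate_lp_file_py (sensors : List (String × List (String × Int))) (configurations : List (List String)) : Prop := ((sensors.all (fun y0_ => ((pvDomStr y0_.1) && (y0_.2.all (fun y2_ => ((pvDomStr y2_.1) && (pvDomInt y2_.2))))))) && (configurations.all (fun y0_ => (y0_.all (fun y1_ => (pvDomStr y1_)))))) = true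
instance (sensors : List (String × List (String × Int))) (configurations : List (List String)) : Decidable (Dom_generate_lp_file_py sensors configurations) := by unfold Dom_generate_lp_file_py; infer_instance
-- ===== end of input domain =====

-- B replaces A's per-sensor rescan of all configurations by a single inverted-index pass
-- (sensor id -> list of configuration indices), then emits each constraint by one lookup.

-- ===== PORT A =====
def generate_lp_file_py (sensors : List (String × List (String × Int))) (configurations : List (List String)) : String :=
  let lines : List String := ["Maximize"]
  let obj_terms : List String :=
    (PySem.List.pyRange 0 (PySem.List.len configurations) 1).map (fun i => "t" ++ PySem.Int.toStr i)
  let lines := lines ++ ["    " ++ PySem.Str.join " + " obj_terms]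
  let lines := lines ++ ["Subject To"]
  let lines := sensors.foldl (fun lines sp =>
      let terms : List String :=
        (PySem.List.enumerate configurations).foldl
          (fun terms ic => if sp.1 ∈ ic.2 then terms ++ ["t" ++ PySem.Int.toStr ic.1] else terms) []
      if !terms.isEmpty then
        -- sensor_data["life"] raises KeyError when absent; Pre_ excludes that case (the default 0 is never read under Pre_)
        lines ++ ["    " ++ PySem.Str.join " + " terms ++ " <= " ++
                  PySem.Int.toStr ((PySem.Dict.mk sp.2).getD "life" 0)]
      else lines) lines
  let lines := lines ++ ["Bounds"]
  let lines := (PySem.List.pyRange 0 (PySem.List.len configurations) 1).foldl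
      (fun lines i => lines ++ ["    t" ++ PySem.Int.toStr i ++ " >= 0"]) lines
  let lines := lines ++ ["End"]
  PySem.Str.join "\n" lines

-- ===== PORT B =====
def generate_lp_file_py_alt (sensors : List (String × List (String × Int))) (configurations : List (List String)) : String :=
  let idx : PySem.Dict String (List Int) :=
    (PySem.List.enumerate configurations).foldl
      (fun d ic => (PySem.Set.ofList ic.2).foldl (fun d s => d.modify s [] (· ++ [ic.1])) d)
      PySem.Dict.empty
  let n := PySem.List.len configurations
  let parts : List String :=
    ["Maximize",
     "    " ++ PySem.Str.join " + " ((PySem.List.pyRange 0 n 1).map (fun i => "t" ++ PySem.Int.toStr i)),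
     "Subject To"]
    ++ ((sensors.filter (fun sp => !(idx.getD sp.1 []).isEmpty)).map (fun sp =>
        "    " ++ PySem.Str.join " + " ((idx.getD sp.1 []).map (fun i => "t" ++ PySem.Int.toStr i)) ++
        " <= " ++ PySem.Int.toStr ((PySem.Dict.mk sp.2).getD "life" 0)))
    ++ ["Bounds"]
    ++ ((PySem.List.pyRange 0 n 1).map (fun i => "    t" ++ PySem.Int.toStr i ++ " >= 0"))
    ++ ["End"]
  PySem.Str.join "\n" parts

-- ===== PRECONDITION & SPEC =====
-- Pre_ excludes inputs where A raises KeyError (a sensor occurring in some configuration whose data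
-- dict lacks the key "life") and, because Python dicts cannot hold duplicate keys, association lists
-- with a duplicate sensor id or a duplicate "life" key, which no Python dict input can denote.
def Pre_generate_lp_file_py (sensors : List (String × List (String × Int))) (configurations : List (List String)) : Prop :=
  (sensors.map Prod.fst).Nodup ∧
  ∀ p ∈ sensors, (∃ c ∈ configurations, p.1 ∈ c) → (p.2.map Prod.fst).count "life" = 1
instance (sensors : List (String × List (String × Int))) (configurations : List (List String)) : Decidable (Pre_generate_lp_file_py sensors configurations) := by unfold Pre_generate_lp_file_py; infer_instance

def pvWitness_generate_lp_file_py : (List (String × List (String × Int))) × List (List String) :=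
  ([("s1", [("life", 3)]), ("s2", [("life", 1)])], [["s1"], ["s1", "s2"], []])

def Spec_generate_lp_file_py (sensors : List (String × List (String × Int))) (configurations : List (List String)) (out : String) : Prop := out = generate_lp_file_py_alt sensors configurations
instance (sensors : List (String × List (String × Int))) (configurations : List (List String)) (out : String) : Decidable (Spec_generate_lp_file_py sensors configurations out) := by unfold Spec_generate_lp_file_py; infer_instance

-- ===== CLAIM (what is proved, stated in full; the proofs are below) =====
def Claim_equal_generate_lp_file_py : Prop := ∀ (sensors : List (String × List (String × Int))) (configurations : List (List String)), Dom_generate_lp_file_py sensors configurations → Pre_generate_lp_file_py sensors configurations → Spec_generate_lp_file_py sensors configurations (generate_lp_file_py sensors configurations)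

-- ===== LEMMAS AND PROOFS =====

-- A Nodup list filtered for equality with x is [x] or [].
lemma pv_filter_beq_nodup (l : List String) (x : String) (h : l.Nodup) :
    l.filter (fun y => y == x) = if x ∈ l then [x] else [] := by
  induction l with
  | nil => simp
  | cons a t ih =>
    rcases List.nodup_cons.mp h with ⟨ha, ht⟩
    by_cases hax : a = x
    · subst hax
      simp [ih ht, ha]
    · simp [hax, ih ht, Ne.symm hax]

-- One configuration's inner loop: sid's entry gains [i] exactly when sid occurs in the configuration.
lemma pv_inner_getD (c : List String) (i : Int) (d : PySem.Dict String (List Int)) (sid : String) :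
    ((PySem.Set.ofList c).foldl (fun d s => d.modify s [] (· ++ [i])) d).getD sid []
      = if sid ∈ c then d.getD sid [] ++ [i] else d.getD sid [] := by
  have h1 : (PySem.Set.ofList c).foldl (fun d s => d.modify s [] (· ++ [i])) d
      = ((PySem.Set.ofList c).map (fun s => (s, i))).foldl (fun d p => d.modify p.1 [] (· ++ [p.2])) d := by
    rw [List.foldl_map]
  rw [h1, PySem.Dict.getD_foldl_modify_append, List.filter_map]
  have h2 : ((PySem.Set.ofList c).filter ((fun p : String × Int => p.1 == sid) ∘ (fun s => (s, i))))
      = if sid ∈ c then [sid] else [] := by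
    have := pv_filter_beq_nodup (PySem.Set.ofList c) sid (PySem.Set.nodup_ofList c)
    simpa [Function.comp, PySem.Set.mem_ofList] using this
  rw [h2]
  by_cases hm : sid ∈ c <;> simp [hm]

-- The whole index-building pass: sid's entry is the list of indices of configurations containing sid.
lemma pv_outer_getD (ps : List (Int × List String)) (d : PySem.Dict String (List Int)) (sid : String) :
    (ps.foldl (fun d ic => (PySem.Set.ofList ic.2).foldl (fun d s => d.modify s [] (· ++ [ic.1])) d) d).getD sid []
      = d.getD sid [] ++ (ps.filter (fun ic => decide (sid ∈ ic.2))).map (·.1) := by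
  induction ps generalizing d with
  | nil => simp
  | cons p t ih =>
    rw [List.foldl_cons, ih, pv_inner_getD]
    by_cases h : sid ∈ p.2 <;> simp [h]

-- ===== VERDICT (by name: the statement is the Claim_ definition above) =====
theorem generate_lp_file_py_spec : Claim_equal_generate_lp_file_py := by
  intro sensors configurations _ _
  show generate_lp_file_py sensors configurations = generate_lp_file_py_alt sensors configurations
  unfold generate_lp_file_py generate_lp_file_py_alt
  have hidx : ∀ s : String,
      ((PySem.List.enumerate configurations).foldl
        (fun d ic => (PySem.Set.ofList ic.2).foldl (fun d s => d.modify s [] (· ++ [ic.1])) d)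
        PySem.Dict.empty).getD s []
      = ((PySem.List.enumerate configurations).filter (fun ic => decide (s ∈ ic.2))).map (·.1) := by
    intro s; rw [pv_outer_getD]; simp
  simp only [PySem.List.foldl_append_ite, PySem.List.foldl_append_singleton_eq_map]
  simp [hidx, List.map_map, Function.comp_def, List.isEmpty_map]
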